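-- pv_equiv track=rewrite | github.com/JoseVillagranE/AdventOfCode2023 | day3.py | get_part_number
-- ===== SOURCE A (Python) =====
-- def get_part_number(cline: str, pline: str, nline: str) -> tuple:
--     is_part_number = False
--     number = ""
--     i = 0
--     if not cline[0].isdigit():
--         if pline:
--             if not pline[0].isdigit() and pline[0] != ".":
--                 is_part_number = True
--         if nline:
--             if not nline[0].isdigit() and nline[0] != ".":
--                 is_part_number = True
--         if cline[0] != ".":
--             is_part_number = True
--
--         i += 1
--
--     while i < len(cline) and cline[i].isdigit():
--         if pline:
--             if not pline[i].isdigit() and pline[i] != ".":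
--                 is_part_number = True
--         if nline:
--             if not nline[i].isdigit() and nline[i] != ".":
--                 is_part_number = True
--         number += cline[i]
--         i += 1
--
--     if i < len(cline):
--         if not cline[i].isdigit() and cline[i] != ".":
--             is_part_number = True
--         if pline:
--             if not pline[i].isdigit() and pline[i] != ".":
--                 is_part_number = True
--         if nline:
--             if not nline[i].isdigit() and nline[i] != ".":
--                 is_part_number = True
--     return int(number) if is_part_number else -1, i
-- ===== SOURCE B (Python) =====
-- def get_part_number(cline: str, pline: str, nline: str) -> tuple:
--     # phase 1: extract the digit span cline[s:e]
--     s = 0 if cline[0].isdigit() else 1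
--     e = s
--     while e < len(cline) and cline[e].isdigit():
--         e += 1
--     number = cline[s:e]
--
--     # phase 2: adjacency check over the covered index range
--     def sym(c):
--         return not c.isdigit() and c != "."
--
--     hi = min(e, len(cline) - 1)
--     is_part = (s == 1 and sym(cline[0])) or (e < len(cline) and sym(cline[e]))
--     for line in (pline, nline):
--         if line and any(sym(line[j]) for j in range(hi + 1)):
--             is_part = True
--     return (int(number) if is_part else -1), e
-- ===== Notes on version B (the rewrite author's own statement) =====
-- stated objective: simpler
-- what changed: A builds the number and tests symbol adjacency in one interleaved while loop with a running flag; B first extracts the digit span as a slice, then does a separate adjacency pass over the covered index range with any() over range(hi+1).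
import Mathlib
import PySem

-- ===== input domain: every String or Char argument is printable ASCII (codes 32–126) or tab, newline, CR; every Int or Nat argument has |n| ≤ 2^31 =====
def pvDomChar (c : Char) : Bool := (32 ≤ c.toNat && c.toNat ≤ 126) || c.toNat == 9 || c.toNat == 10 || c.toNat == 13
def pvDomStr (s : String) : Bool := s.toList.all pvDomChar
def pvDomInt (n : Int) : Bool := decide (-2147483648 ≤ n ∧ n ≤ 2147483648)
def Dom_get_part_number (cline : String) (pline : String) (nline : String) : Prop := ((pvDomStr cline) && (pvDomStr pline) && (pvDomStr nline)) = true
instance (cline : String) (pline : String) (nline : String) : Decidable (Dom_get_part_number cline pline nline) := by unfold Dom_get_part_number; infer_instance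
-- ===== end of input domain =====

-- B splits A's single interleaved scan into an extraction phase (digit span via a slice) and a
-- separate adjacency phase over the covered index range; objective: simpler decomposition, same cost.

-- ===== PORT A =====
-- A checks symbols position-by-position while it builds the number in one interleaved while loop.
def symA (c : Char) : Bool := !c.isDigit && c != '.'

def getA (l : List Char) (i : Nat) : Char := l.getD i '.'

-- the while loop of A: state (is_part, number, i)
def aLoop (C P N : List Char) (i : Nat) (isp : Bool) (num : List Char) : Bool × List Char × Nat :=
  if h : i < C.length ∧ (getA C i).isDigit then
    let isp1 := if P ≠ [] ∧ symA (getA P i) then true else isp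
    let isp2 := if N ≠ [] ∧ symA (getA N i) then true else isp1
    aLoop C P N (i + 1) isp2 (num ++ [getA C i])
  else (isp, num, i)
termination_by C.length - i
decreasing_by omega

def get_part_number (cline : String) (pline : String) (nline : String) : Int × Int :=
  let C := cline.toList
  let P := pline.toList
  let N := nline.toList
  -- `cline[0]` raises IndexError on an empty line: excluded by Pre_ (getA's default is inert there)
  let si :=
    if !(getA C 0).isDigit then
      let a := if P ≠ [] ∧ symA (getA P 0) then true else false
      let b := if N ≠ [] ∧ symA (getA N 0) then true else a
      let c := if getA C 0 ≠ '.' then true else b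
      (c, 1)
    else (false, 0)
  let r := aLoop C P N si.2 si.1 []
  let isp :=
    if r.2.2 < C.length then
      let a := if symA (getA C r.2.2) then true else r.1
      let b := if P ≠ [] ∧ symA (getA P r.2.2) then true else a
      if N ≠ [] ∧ symA (getA N r.2.2) then true else b
    else r.1
  -- int("") raises ValueError: Pre_ excludes isp = true with an empty number
  ((if isp then (PySem.Int.ofStr? (String.ofList r.2.1)).getD 0 else -1), (r.2.2 : Int))

-- ===== PORT B =====
def symB (c : Char) : Bool := !c.isDigit && c != '.'

-- phase 1 of B: advance e over the digit run
def bRun (C : List Char) (e : Nat) : Nat :=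
  if h : e < C.length ∧ (C.getD e '.').isDigit then bRun C (e + 1) else e
termination_by C.length - e
decreasing_by omega

-- `if line and any(sym(line[j]) for j in range(hi + 1))`
def bCheck (line : List Char) (hi : Nat) : Bool :=
  !line.isEmpty && (List.range (hi + 1)).any (fun j => symB (line.getD j '.'))

def get_part_number_alt (cline : String) (pline : String) (nline : String) : Int × Int :=
  let C := cline.toList
  let s : Nat := if (C.getD 0 '.').isDigit then 0 else 1
  let e := bRun C s
  let number := (C.drop s).take (e - s)   -- cline[s:e] (s ≤ e ≤ len C, so plain take/drop is exact)
  let hi := min e (C.length - 1)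
  let isPart :=
    ((s == 1 && symB (C.getD 0 '.')) || (decide (e < C.length) && symB (C.getD e '.')))
      || bCheck pline.toList hi || bCheck nline.toList hi
  ((if isPart then (PySem.Int.ofStr? (String.ofList number)).getD 0 else -1), (e : Int))

-- ===== PRECONDITION & SPEC =====
-- Pre_ excludes exactly the inputs on which the Python A raises: an empty cline (IndexError),
-- pline/nline nonempty but shorter than the scanned index range (IndexError), and the case where
-- no digit is parsed yet a symbol is adjacent, so int("") raises ValueError.
def pvSym (c : Char) : Bool := !c.isDigit && c != '.'

def Pre_get_part_number (cline : String) (pline : String) (nline : String) : Prop :=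
  let C := cline.toList
  let P := pline.toList
  let N := nline.toList
  let s : Nat := if (C.getD 0 '.').isDigit then 0 else 1
  let e : Nat := s + ((C.drop s).takeWhile Char.isDigit).length
  let hi : Nat := min e (C.length - 1)
  C ≠ [] ∧ (P = [] ∨ hi < P.length) ∧ (N = [] ∨ hi < N.length) ∧
    (s < e ∨
      ((List.range (hi + 1)).all (fun j =>
        !pvSym (C.getD j '.') && !(!P.isEmpty && pvSym (P.getD j '.'))
          && !(!N.isEmpty && pvSym (N.getD j '.')))) = true)

instance (cline : String) (pline : String) (nline : String) : Decidable (Pre_get_part_number cline pline nline) := by unfold Pre_get_part_number; infer_instance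

def pvWitness_get_part_number : String × String × String := ("467..", "...*.", ".....")

def Spec_get_part_number (cline : String) (pline : String) (nline : String) (out : Int × Int) : Prop := out = get_part_number_alt cline pline nline
instance (cline : String) (pline : String) (nline : String) (out : Int × Int) : Decidable (Spec_get_part_number cline pline nline out) := by unfold Spec_get_part_number; infer_instance

-- ===== CLAIM (what is proved, stated in full; the proofs are below) =====
def Claim_equal_get_part_number : Prop := ∀ (cline : String) (pline : String) (nline : String), Dom_get_part_number cline pline nline → Pre_get_part_number cline pline nline → Spec_get_part_number cline pline nline (get_part_number cline pline nline)

-- ===== LEMMAS AND PROOFS =====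

theorem ifTrueOr (p : Prop) [Decidable p] (b : Bool) : (if p then true else b) = (decide p || b) := by
  by_cases h : p <;> simp [h]

theorem bRun_step (C : List Char) (i : Nat) (h : i < C.length ∧ (C.getD i '.').isDigit) :
    bRun C i = bRun C (i + 1) := by
  rw [bRun, dif_pos h]

theorem bRun_stop (C : List Char) (i : Nat) (h : ¬ (i < C.length ∧ (C.getD i '.').isDigit)) :
    bRun C i = i := by
  rw [bRun, dif_neg h]

theorem bRun_ge (C : List Char) (i : Nat) : i ≤ bRun C i := by
  have H : ∀ k i, C.length - i ≤ k → i ≤ bRun C i := by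
    intro k
    induction k with
    | zero => intro i hk; rw [bRun_stop C i (by omega)]
    | succ k ih =>
      intro i hk
      by_cases h : i < C.length ∧ (C.getD i '.').isDigit
      · rw [bRun_step C i h]; have := ih (i + 1) (by omega); omega
      · rw [bRun_stop C i h]
  exact H (C.length - i) i le_rfl

theorem bRun_le (C : List Char) (i : Nat) (hi : i ≤ C.length) : bRun C i ≤ C.length := by
  have H : ∀ k i, C.length - i ≤ k → i ≤ C.length → bRun C i ≤ C.length := by
    intro k
    induction k with
    | zero => intro i hk h; rw [bRun_stop C i (by omega)]; omega
    | succ k ih =>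
      intro i hk h
      by_cases hc : i < C.length ∧ (C.getD i '.').isDigit
      · rw [bRun_step C i hc]; exact ih (i + 1) (by omega) (by omega)
      · rw [bRun_stop C i hc]; omega
  exact H (C.length - i) i le_rfl hi

-- the digits collected by A's loop
def ldig (C : List Char) (i : Nat) : List Char :=
  if h : i < C.length ∧ (C.getD i '.').isDigit then C.getD i '.' :: ldig C (i + 1) else []
termination_by C.length - i
decreasing_by omega

-- the pline/nline symbol flag accumulated by A's loop
def lchk (C P N : List Char) (i : Nat) : Bool :=
  if h : i < C.length ∧ (C.getD i '.').isDigit then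
    (decide (P ≠ [] ∧ symA (P.getD i '.') = true) || decide (N ≠ [] ∧ symA (N.getD i '.') = true)) || lchk C P N (i + 1)
  else false
termination_by C.length - i
decreasing_by omega

theorem aLoop_eq (C P N : List Char) :
    ∀ i isp num, aLoop C P N i isp num = (isp || lchk C P N i, num ++ ldig C i, bRun C i) := by
  have H : ∀ k i, C.length - i ≤ k → ∀ isp num,
      aLoop C P N i isp num = (isp || lchk C P N i, num ++ ldig C i, bRun C i) := by
    intro k
    induction k with
    | zero =>
      intro i hk isp num
      have h : ¬ (i < C.length ∧ (getA C i).isDigit) := by simp [getA]; omega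
      rw [aLoop, dif_neg h, lchk, dif_neg (by simpa [getA] using h), ldig,
        dif_neg (by simpa [getA] using h), bRun_stop C i (by simpa [getA] using h)]
      simp
    | succ k ih =>
      intro i hk isp num
      by_cases h : i < C.length ∧ (getA C i).isDigit
      · rw [aLoop, dif_pos h, lchk, dif_pos (by simpa [getA] using h), ldig,
          dif_pos (by simpa [getA] using h), bRun_step C i (by simpa [getA] using h)]
        rw [ih (i + 1) (by omega)]
        simp only [ifTrueOr, getA, Prod.mk.injEq, List.append_assoc, List.singleton_append]
        refine ⟨?_, trivial⟩
        by_cases hP : P ≠ [] ∧ symA (P.getD i '.') = true <;>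
          by_cases hN : N ≠ [] ∧ symA (N.getD i '.') = true <;>
          cases isp <;> simp [hP, hN, Bool.or_comm, Bool.or_left_comm, Bool.or_assoc]
      · rw [aLoop, dif_neg h, lchk, dif_neg (by simpa [getA] using h), ldig,
          dif_neg (by simpa [getA] using h), bRun_stop C i (by simpa [getA] using h)]
        simp
  intro i; exact H (C.length - i) i le_rfl

theorem lchk_iff (C P N : List Char) (i : Nat) :
    lchk C P N i = true ↔ ∃ j, i ≤ j ∧ j < bRun C i ∧
      ((P ≠ [] ∧ symA (P.getD j '.') = true) ∨ (N ≠ [] ∧ symA (N.getD j '.') = true)) := by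
  have H : ∀ k i, C.length - i ≤ k → (lchk C P N i = true ↔ ∃ j, i ≤ j ∧ j < bRun C i ∧
      ((P ≠ [] ∧ symA (P.getD j '.') = true) ∨ (N ≠ [] ∧ symA (N.getD j '.') = true))) := by
    intro k
    induction k with
    | zero =>
      intro i hk
      have h : ¬ (i < C.length ∧ (C.getD i '.').isDigit) := by omega
      rw [lchk, dif_neg h, bRun_stop C i h]
      constructor
      · intro hfalse; simp at hfalse
      · rintro ⟨j, h1, h2, _⟩; omega
    | succ k ih =>
      intro i hk
      by_cases h : i < C.length ∧ (C.getD i '.').isDigit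
      · rw [lchk, dif_pos h, bRun_step C i h]
        have hsub := ih (i + 1) (by omega)
        constructor
        · intro hor
          simp only [Bool.or_eq_true, decide_eq_true_eq] at hor
          rcases hor with (⟨hp1, hp2⟩ | ⟨hn1, hn2⟩) | hrest
          · exact ⟨i, le_rfl, by have := bRun_ge C (i + 1); omega, Or.inl ⟨hp1, hp2⟩⟩
          · exact ⟨i, le_rfl, by have := bRun_ge C (i + 1); omega, Or.inr ⟨hn1, hn2⟩⟩
          · obtain ⟨j, h1, h2, h3⟩ := hsub.mp hrest
            exact ⟨j, by omega, h2, h3⟩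
        · rintro ⟨j, h1, h2, h3⟩
          simp only [Bool.or_eq_true, decide_eq_true_eq]
          by_cases hj : j = i
          · subst hj; left; tauto
          · right; exact hsub.mpr ⟨j, by omega, h2, h3⟩
      · rw [lchk, dif_neg h, bRun_stop C i h]
        constructor
        · intro hfalse; simp_all
        · rintro ⟨j, h1, h2, _⟩; omega
  exact H (C.length - i) i le_rfl

theorem ldig_eq_take (C : List Char) (i : Nat) :
    ldig C i = (C.drop i).take (bRun C i - i) := by
  have H : ∀ k i, C.length - i ≤ k → ldig C i = (C.drop i).take (bRun C i - i) := by
    intro k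
    induction k with
    | zero =>
      intro i hk
      have h : ¬ (i < C.length ∧ (C.getD i '.').isDigit) := by omega
      rw [ldig, dif_neg h, bRun_stop C i h]
      simp
    | succ k ih =>
      intro i hk
      by_cases h : i < C.length ∧ (C.getD i '.').isDigit
      · rw [ldig, dif_pos h, bRun_step C i h, ih (i + 1) (by omega)]
        have hlt : i < C.length := h.1
        have hgd : C.getD i '.' = C[i] := List.getD_eq_getElem C '.' hlt
        have hdrop : C.drop i = C[i] :: C.drop (i + 1) := List.drop_eq_getElem_cons hlt
        have hge : i + 1 ≤ bRun C (i + 1) := bRun_ge C (i + 1)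
        rw [hgd, hdrop]
        have : bRun C (i + 1) - i = (bRun C (i + 1) - (i + 1)) + 1 := by omega
        rw [this, List.take_succ_cons]
      · rw [ldig, dif_neg h, bRun_stop C i h]
        simp
  exact H (C.length - i) i le_rfl

-- index-set equality between A's scattered adjacency checks and B's single range scan
theorem setIff (pch : Nat → Prop) (s e len hi : Nat)
    (hse : s ≤ e) (hel : e ≤ len ∨ (len = 0 ∧ s = 1 ∧ e = 1))
    (he0 : s = 0 → 1 ≤ e ∧ 1 ≤ len) (hs : s = 0 ∨ s = 1)
    (hhi : hi = min e (len - 1)) :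
    ((s = 1 ∧ pch 0) ∨ (∃ j, s ≤ j ∧ j < e ∧ pch j) ∨ (e < len ∧ pch e)) ↔
      (∃ j, j < hi + 1 ∧ pch j) := by
  constructor
  · rintro (⟨h1, h2⟩ | ⟨j, h1, h2, h3⟩ | ⟨h1, h2⟩)
    · exact ⟨0, by omega, h2⟩
    · exact ⟨j, by omega, h3⟩
    · exact ⟨e, by omega, h2⟩
  · rintro ⟨j, h1, h2⟩
    by_cases hjs : j < s
    · left; constructor
      · omega
      · have : j = 0 := by omega
        rwa [this] at h2
    · by_cases hje : j < e
      · right; left; exact ⟨j, by omega, hje, h2⟩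
      · right; right
        have : j = e ∧ e < len := by omega
        rw [← this.1]; exact ⟨by omega, h2⟩

theorem exists_or_split (s e : Nat) (p q : Nat → Prop) :
    (∃ j, s ≤ j ∧ j < e ∧ (p j ∨ q j)) ↔ (∃ j, s ≤ j ∧ j < e ∧ p j) ∨ (∃ j, s ≤ j ∧ j < e ∧ q j) := by
  constructor
  · rintro ⟨j, h1, h2, h3 | h3⟩
    · exact Or.inl ⟨j, h1, h2, h3⟩
    · exact Or.inr ⟨j, h1, h2, h3⟩
  · rintro (⟨j, h1, h2, h3⟩ | ⟨j, h1, h2, h3⟩)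
    · exact ⟨j, h1, h2, Or.inl h3⟩
    · exact ⟨j, h1, h2, Or.inr h3⟩

theorem bCheck_iff (line : List Char) (hi : Nat) :
    bCheck line hi = true ↔ ∃ j, j < hi + 1 ∧ (line ≠ [] ∧ symA (line.getD j '.') = true) := by
  constructor
  · intro h
    simp only [bCheck, Bool.and_eq_true, List.any_eq_true, List.mem_range] at h
    obtain ⟨h1, j, hj, hs⟩ := h
    exact ⟨j, hj, by simpa using h1, hs⟩
  · rintro ⟨j, hj, h1, h2⟩
    simp only [bCheck, Bool.and_eq_true, List.any_eq_true, List.mem_range]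
    exact ⟨by simpa using h1, j, hj, h2⟩

set_option maxHeartbeats 1000000 in
theorem isp_main (C P N : List Char) (s : Nat) (pre0 : Bool)
    (hs : s = 0 ∨ s = 1)
    (hs0 : s = 0 → 0 < C.length ∧ (C.getD 0 '.').isDigit = true ∧ pre0 = false)
    (hs1 : s = 1 → (pre0 = true ↔ (symA (C.getD 0 '.') = true ∨
        (P ≠ [] ∧ symA (P.getD 0 '.') = true) ∨ (N ≠ [] ∧ symA (N.getD 0 '.') = true)))) :
    (if bRun C s < C.length then
        if N ≠ [] ∧ symA (N.getD (bRun C s) '.') = true then true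
        else
          if P ≠ [] ∧ symA (P.getD (bRun C s) '.') = true then true
          else if symA (C.getD (bRun C s) '.') = true then true else pre0 || lchk C P N s
      else pre0 || lchk C P N s)
    = ((s == 1) && symB (C.getD 0 '.') ||
        decide (bRun C s < C.length) && symB (C.getD (bRun C s) '.') ||
        bCheck P (min (bRun C s) (C.length - 1)) || bCheck N (min (bRun C s) (C.length - 1))) := by
  have hse : s ≤ bRun C s := bRun_ge C s
  have hel : bRun C s ≤ C.length ∨ (C.length = 0 ∧ s = 1 ∧ bRun C s = 1) := by
    rcases (show s ≤ C.length ∨ C.length < s by omega) with h | h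
    · exact Or.inl (bRun_le C s h)
    · right
      have hs1' : s = 1 := by rcases hs with h0 | h1 <;> omega
      have hlen : C.length = 0 := by omega
      have := bRun_stop C s (by omega)
      exact ⟨hlen, hs1', by omega⟩
  have he0 : s = 0 → 1 ≤ bRun C s ∧ 1 ≤ C.length := by
    intro h0
    obtain ⟨hpos, hdig, -⟩ := hs0 h0
    subst h0
    refine ⟨?_, hpos⟩
    rw [bRun_step C 0 ⟨hpos, hdig⟩]
    exact bRun_ge C 1
  have hPiff := setIff (fun j => P ≠ [] ∧ symA (P.getD j '.') = true) s (bRun C s) C.length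
    (min (bRun C s) (C.length - 1)) hse hel he0 hs rfl
  have hNiff := setIff (fun j => N ≠ [] ∧ symA (N.getD j '.') = true) s (bRun C s) C.length
    (min (bRun C s) (C.length - 1)) hse hel he0 hs rfl
  have hlc := (lchk_iff C P N s).trans
    (exists_or_split s (bRun C s) _ _)
  have hbP := bCheck_iff P (min (bRun C s) (C.length - 1))
  have hbN := bCheck_iff N (min (bRun C s) (C.length - 1))
  have hsymB : symB = symA := rfl
  rw [Bool.eq_iff_iff, hsymB]
  generalize hgen : bRun C s = e at *
  by_cases hlt : e < C.length
  · rw [if_pos hlt]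
    simp only [ifTrueOr, Bool.or_eq_true, Bool.and_eq_true, decide_eq_true_eq, beq_iff_eq,
      hbP, hbN, hlc, hlt, true_and]
    rcases hs with h0 | h1
    · obtain ⟨-, -, hpre⟩ := hs0 h0
      subst h0
      have h01 : ((0:ℕ) = 1) ↔ False := by simp
      simp only [h01, false_and, false_or, or_false, hlt, true_and] at hPiff hNiff ⊢
      simp only [hpre, Bool.false_eq_true, false_or]
      rw [← hPiff, ← hNiff]
      constructor
      · rintro (h | h | h | h | h)
        exacts [Or.inr (Or.inr h), Or.inl (Or.inr (Or.inr h)), Or.inl (Or.inl h),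
          Or.inl (Or.inr (Or.inl h)), Or.inr (Or.inl h)]
      · rintro ((h | h | h) | h | h)
        exacts [Or.inr (Or.inr (Or.inl h)), Or.inr (Or.inr (Or.inr (Or.inl h))), Or.inr (Or.inl h),
          Or.inr (Or.inr (Or.inr (Or.inr h))), Or.inl h]
    · have hpre := hs1 h1
      subst h1
      have h11 : ((1:ℕ) = 1) ↔ True := by simp
      simp only [h11, true_and, hlt] at hPiff hNiff ⊢
      simp only [hpre]
      rw [← hPiff, ← hNiff]
      constructor
      · rintro (h | h | h | (h | h | h) | h | h)
        exacts [Or.inr (Or.inr (Or.inr h)), Or.inl (Or.inr (Or.inr (Or.inr h))),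
          Or.inl (Or.inl (Or.inr h)), Or.inl (Or.inl (Or.inl h)), Or.inl (Or.inr (Or.inl h)),
          Or.inr (Or.inl h), Or.inl (Or.inr (Or.inr (Or.inl h))), Or.inr (Or.inr (Or.inl h))]
      · rintro (((h | h) | h | h | h) | h | h | h)
        exacts [Or.inr (Or.inr (Or.inr (Or.inl (Or.inl h)))), Or.inr (Or.inr (Or.inl h)),
          Or.inr (Or.inr (Or.inr (Or.inl (Or.inr (Or.inl h))))),
          Or.inr (Or.inr (Or.inr (Or.inr (Or.inl h)))), Or.inr (Or.inl h),
          Or.inr (Or.inr (Or.inr (Or.inl (Or.inr (Or.inr h))))),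
          Or.inr (Or.inr (Or.inr (Or.inr (Or.inr h)))), Or.inl h]
  · rw [if_neg hlt]
    simp only [ifTrueOr, Bool.or_eq_true, Bool.and_eq_true, decide_eq_true_eq, beq_iff_eq,
      hbP, hbN, hlc]
    have hltf : (e < C.length) ↔ False := iff_false_intro hlt
    rcases hs with h0 | h1
    · obtain ⟨-, -, hpre⟩ := hs0 h0
      subst h0
      have h01 : ((0:ℕ) = 1) ↔ False := by simp
      simp only [h01, hltf, false_and, false_or, or_false, decide_false, Bool.false_and,
        Bool.false_eq_true] at hPiff hNiff ⊢
      simp only [hpre, Bool.false_eq_true, false_or]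
      rw [← hPiff, ← hNiff]
    · have hpre := hs1 h1
      subst h1
      have h11 : ((1:ℕ) = 1) ↔ True := by simp
      simp only [h11, hltf, true_and, false_and, false_or, or_false, decide_false,
        Bool.false_and, Bool.false_eq_true] at hPiff hNiff ⊢
      simp only [hpre]
      rw [← hPiff, ← hNiff]
      constructor
      · rintro ((h | h | h) | h | h)
        exacts [Or.inl (Or.inl h), Or.inl (Or.inr (Or.inl h)), Or.inr (Or.inl h),
          Or.inl (Or.inr (Or.inr h)), Or.inr (Or.inr h)]
      · rintro ((h | h | h) | h | h)
        exacts [Or.inl (Or.inl h), Or.inl (Or.inr (Or.inl h)), Or.inr (Or.inl h),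
          Or.inl (Or.inr (Or.inr h)), Or.inr (Or.inr h)]

-- ===== VERDICT (by name: the statement is the Claim_ definition above) =====
theorem get_part_number_spec : Claim_equal_get_part_number := by
  intro cline pline nline _ _
  show get_part_number cline pline nline = get_part_number_alt cline pline nline
  unfold get_part_number get_part_number_alt
  by_cases hd : (cline.toList.getD 0 '.').isDigit
  · have hlen : 0 < cline.toList.length := by
      cases h : cline.toList with
      | nil => rw [h] at hd; simp at hd
      | cons a l => simp [h]
    have hisp := isp_main cline.toList pline.toList nline.toList 0 false (Or.inl rfl)
      (fun _ => ⟨hlen, hd, rfl⟩) (fun h => absurd h (by omega))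
    simp only [getA, hd, aLoop_eq, Bool.not_true, Bool.false_eq_true, if_false, reduceIte]
    refine Prod.ext ?_ rfl
    refine if_congr (iff_of_eq (congrArg (· = true) hisp)) ?_ rfl
    rw [ldig_eq_take]
    simp
  · have hisp := isp_main cline.toList pline.toList nline.toList 1
      (if cline.toList.getD 0 '.' ≠ '.' then true
       else if nline.toList ≠ [] ∧ symA (nline.toList.getD 0 '.') = true then true
       else if pline.toList ≠ [] ∧ symA (pline.toList.getD 0 '.') = true then true else false)
      (Or.inr rfl) (fun h => absurd h (by omega))
      (fun _ => by
        have hd' : (cline.toList.getD 0 '.').isDigit = false := by simpa using hd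
        constructor
        · intro h
          split_ifs at h with h1 h2 h3
          · refine Or.inl ?_
            simp only [symA, Bool.and_eq_true, Bool.not_eq_true', bne_iff_ne]
            exact ⟨hd', h1⟩
          · exact Or.inr (Or.inr h2)
          · exact Or.inr (Or.inl h3)
        · intro h
          rcases h with hC | hP | hN
          · have h1 : cline.toList.getD 0 '.' ≠ '.' := by
              intro he; rw [he] at hC; simp [symA] at hC
            rw [if_pos h1]
          · by_cases h1 : cline.toList.getD 0 '.' ≠ '.'
            · rw [if_pos h1]
            · rw [if_neg h1]
              by_cases h2 : nline.toList ≠ [] ∧ symA (nline.toList.getD 0 '.') = true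
              · rw [if_pos h2]
              · rw [if_neg h2, if_pos hP]
          · by_cases h1 : cline.toList.getD 0 '.' ≠ '.'
            · rw [if_pos h1]
            · rw [if_neg h1, if_pos hN])
    simp only [getA, hd, aLoop_eq, Bool.not_false, Bool.false_eq_true, if_true, if_false,
      reduceIte]
    refine Prod.ext ?_ rfl
    refine if_congr (iff_of_eq (congrArg (· = true) hisp)) ?_ rfl
    rw [ldig_eq_take]
    simp
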